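-- pv_equiv track=rewrite | github.com/Djaenk/Classroom-Projects | CS 3339 Information Assurance and Security/Lab3/cracker.py | get_variations
-- ===== SOURCE A (Python) =====
-- def get_variations(password, index):
-- 	variations = []
-- 	if index < len(password):
-- 		try:
-- 			for char_alternative in character_alternatives[password[index]]:
-- 				variation = password[:index] + char_alternative + password[index + 1:]
-- 				variations.append(variation)
-- 				variations.extend(get_variations(variation, index + 1))
-- 			variations.extend(get_variations(password, index + 1))
-- 		except:
-- 			pass
-- 	return variations
--
-- character_alternatives = {
-- 	'a': ['A', '@', '4'],
-- 	'b': ['C', '8', '6'],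
-- 	'c': ['C', '<', '{', '[', '('],
-- 	'd': ['D', '0'],
-- 	'e': ['E', '3'],
-- 	'f': ['F'],
-- 	'g': ['G', '[', '-', '6', '9'],
-- 	'h': ['H', '4'],
-- 	'i': ['I', '1', '!', '|', '9'],
-- 	'j': ['J', '7', '9'],
-- 	'k': ['K'],
-- 	'l': ['L', '1', '|'],
-- 	'm': ['M'],
-- 	'n': ['N'],
-- 	'o': ['O', '0'],
-- 	'p': ['P'],
-- 	'q': ['Q', '9', '0'],
-- 	'r': ['R', '2'],
-- 	's': ['S', '5', '$'],
-- 	't': ['T', '7', '+'],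
-- 	'u': ['U'],
-- 	'v': ['V'],
-- 	'w': ['W'],
-- 	'x': ['X', '%', '*', '8'],
-- 	'y': ['Y'],
-- 	'z': ['Z', '2', '5']
-- }
-- ===== SOURCE B (Python) =====
-- # leetspeak substitution table: for each lowercase letter, the string of its alternatives
-- leet = {'a': 'A@4', 'b': 'C86', 'c': 'C<{[(', 'd': 'D0', 'e': 'E3', 'f': 'F',
--         'g': 'G[-69', 'h': 'H4', 'i': 'I1!|9', 'j': 'J79', 'k': 'K', 'l': 'L1|',
--         'm': 'M', 'n': 'N', 'o': 'O0', 'p': 'P', 'q': 'Q90', 'r': 'R2',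
--         's': 'S5$', 't': 'T7+', 'u': 'U', 'v': 'V', 'w': 'W', 'x': 'X%*8',
--         'y': 'Y', 'z': 'Z25'}
--
-- # the same table with each alternative string reversed (pre-computed push order)
-- leet_rev = {k: v[::-1] for k, v in leet.items()}
--
--
-- def get_variations(password, index):
--     # Iterative re-implementation: an explicit LIFO stack of (prefix, tail, emit)
--     # tasks replaces A's recursion.  Popping a task emits prefix+tail (if the
--     # emit flag is set, i.e. the task came from a substitution) and then expands
--     # the substitutions of tail behind the fixed prefix; tasks are pushed in
--     # reverse so pops reproduce A's pre-order exactly.  A negative index is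
--     # treated as out of range (no wraparound).
--     if index < 0:
--         return []
--     out = []
--     stack = [(password[:index], password[index:], False)]
--     pop = stack.pop
--     push = stack.append
--     emit = out.append
--     get = leet_rev.get
--     while stack:
--         prefix, tail, em = pop()
--         if em:
--             emit(prefix + tail)
--         if not tail:
--             continue
--         subs = get(tail[0])
--         if subs is None:
--             continue
--         rest = tail[1:]
--         push((prefix + tail[0], rest, False))       # keep-original branch, expanded last
--         for a in subs:                              # alternatives reversed: first ends on top
--             push((prefix + a, rest, True))
--     return out
-- ===== Notes on version B (the rewrite author's own statement) =====
-- stated objective: alternative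
-- what changed: Replaces A's top-down recursion (halted by the bare except at the first non-substitutable character) by an iterative loop over an explicit LIFO stack of (prefix, tail) expansion tasks and finished variations, over a string-valued substitution table; tasks are pushed in reverse so pops emit the same variations in A's pre-order, and each variation is built from the carried prefix instead of re-slicing the whole password; negative indices are treated as out of range instead of wrapping.
-- intended difference: On a negative in-range index whose wrapped character is a lowercase letter, A applies Python's negative-index wraparound (at index -1 even splicing a doubled string, e.g. get_variations('b',-1) = ['Cb','8b','6b','C','8','6']); B returns [] there, the intended value for an index that is not a real position of the password. — e.g. on get_variations("b", -1): A returns ["Cb", "8b", "6b", "C", "8", "6"], B returns []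
import Mathlib
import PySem

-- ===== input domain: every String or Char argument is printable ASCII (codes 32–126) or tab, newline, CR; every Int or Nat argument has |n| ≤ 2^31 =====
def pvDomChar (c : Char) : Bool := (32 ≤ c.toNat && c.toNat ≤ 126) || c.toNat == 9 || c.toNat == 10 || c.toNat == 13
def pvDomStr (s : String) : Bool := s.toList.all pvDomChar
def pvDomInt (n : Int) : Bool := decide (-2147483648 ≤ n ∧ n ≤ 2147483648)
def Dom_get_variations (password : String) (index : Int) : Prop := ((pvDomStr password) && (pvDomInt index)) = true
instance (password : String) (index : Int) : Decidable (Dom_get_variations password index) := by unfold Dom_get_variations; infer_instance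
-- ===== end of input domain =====

-- B replaces A's recursion by an iterative loop over an explicit LIFO stack of
-- (prefix, tail) expansion tasks and finished variations, over a string-valued
-- substitution table (same pre-order output; negative positions are out of range, see D_ below).
-- A's port carries an explicit fuel argument as a totality guard (a proven-sufficient
-- bound on the recursion depth); it changes no computed value.

-- ===== PORT A =====
-- shared module context: the literal dict `character_alternatives` (lookup: some = hit, none = KeyError)
def charAlts (c : Char) : Option (List Char) :=
  match c with
  | 'a' => some ['A', '@', '4']
  | 'b' => some ['C', '8', '6']
  | 'c' => some ['C', '<', '{', '[', '(']
  | 'd' => some ['D', '0']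
  | 'e' => some ['E', '3']
  | 'f' => some ['F']
  | 'g' => some ['G', '[', '-', '6', '9']
  | 'h' => some ['H', '4']
  | 'i' => some ['I', '1', '!', '|', '9']
  | 'j' => some ['J', '7', '9']
  | 'k' => some ['K']
  | 'l' => some ['L', '1', '|']
  | 'm' => some ['M']
  | 'n' => some ['N']
  | 'o' => some ['O', '0']
  | 'p' => some ['P']
  | 'q' => some ['Q', '9', '0']
  | 'r' => some ['R', '2']
  | 's' => some ['S', '5', '$']
  | 't' => some ['T', '7', '+']
  | 'u' => some ['U']
  | 'v' => some ['V']
  | 'w' => some ['W']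
  | 'x' => some ['X', '%', '*', '8']
  | 'y' => some ['Y']
  | 'z' => some ['Z', '2', '5']
  | _ => none

-- the expression s[:i] + a + s[i+1:] (A's splice)
def pySubst (s : List Char) (i : Int) (a : Char) : List Char :=
  PySem.List.slice s none (some i) ++ [a] ++ PySem.List.slice s (some (i + 1)) none

-- fuel bound for A's recursion (i = -1 splices a doubled string, then the index restarts at 0)
def varMeasure (s : List Char) (i : Int) : Nat :=
  if 0 ≤ i then ((s.length : Int) - i).toNat else 2 * s.length + 2 + (-i).toNat

-- A: recursive enumeration, halted (via the bare `except`) by IndexError/KeyError;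
-- the `for char_alternative in …` loop with its `variations` accumulator is the foldl
def varsAF : Nat → List Char → Int → List String
  | 0, _, _ => []                                  -- fuel guard only: never reached (fuel = varMeasure + 1 suffices)
  | f + 1, s, i =>
    if i < (s.length : Int) then
      match (PySem.List.pyGet? s i).bind charAlts with
      | none => []
      | some alts =>
        (alts.foldl (fun acc a =>
          acc ++ [String.ofList (pySubst s i a)] ++ varsAF f (pySubst s i a) (i + 1)) [])
          ++ varsAF f s (i + 1)
    else []

def get_variations (password : String) (index : Int) : List String :=
  varsAF (varMeasure password.toList index + 1) password.toList index

-- ===== PORT B =====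
-- B's module constant `leet`: a dict from lowercase letter to the STRING of its alternatives
def leet : PySem.Dict Char String := PySem.Dict.mk
  [('a', "A@4"), ('b', "C86"), ('c', "C<{[("), ('d', "D0"), ('e', "E3"), ('f', "F"),
   ('g', "G[-69"), ('h', "H4"), ('i', "I1!|9"), ('j', "J79"), ('k', "K"), ('l', "L1|"),
   ('m', "M"), ('n', "N"), ('o', "O0"), ('p', "P"), ('q', "Q90"), ('r', "R2"),
   ('s', "S5$"), ('t', "T7+"), ('u', "U"), ('v', "V"), ('w', "W"), ('x', "X%*8"),
   ('y', "Y"), ('z', "Z25")]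

-- a stack item (prefix, tail, emit): expand the substitutions of `tail` behind the fixed
-- `prefix`, first emitting prefix+tail if the emit flag is set (Python B's `leet_rev` and its
-- push-in-reverse loop become a forward-order list here because the head of the Lean list is
-- the TOP of B's stack: first alternative on top, keep-branch below).
-- The fuel argument is a totality guard only (a proven-sufficient bound on the number of pops,
-- see varLoopF_spec below); it changes no computed value.
def varLoopF : Nat → List String → List (List Char × List Char × Bool) → List String
  | 0, out, _ => out
  | _ + 1, out, [] => out
  | f + 1, out, (p, t, em) :: rest =>
    let out' := if em then out ++ [String.ofList (p ++ t)] else out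
    match t with
    | [] => varLoopF f out' rest
    | c :: tl =>
      match leet.get? c with
      | none => varLoopF f out' rest
      | some subs =>
        varLoopF f out'
          ((subs.toList.map fun a => (p ++ [a], tl, true)) ++ (p ++ [c], tl, false) :: rest)

def get_variations_alt (password : String) (index : Int) : List String :=
  if index < 0 then []
  else
    varLoopF (12 ^ ((PySem.List.slice password.toList (some index) none).length + 1) + 1) []
      [(PySem.List.slice password.toList none (some index),
        PySem.List.slice password.toList (some index) none, false)]

-- ===== PRECONDITION & SPEC =====
-- On a negative in-range index whose (wrapped) character is a lowercase letter, A follows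
-- Python's negative-index wraparound (and at i = -1 even splices a doubled string) and returns
-- those accidental variations; B treats a negative position as out of range and returns [],
-- the intended value for an index that is not a real position of the password.
def D_get_variations (password : String) (index : Int) : Prop :=
  index < 0 ∧ ((PySem.Str.pyGet? password index).elim false fun c => decide ('a' ≤ c ∧ c ≤ 'z')) = true
instance (password : String) (index : Int) : Decidable (D_get_variations password index) := by
  unfold D_get_variations; infer_instance

def Spec_get_variations (password : String) (index : Int) (out : List String) : Prop :=
  ¬ D_get_variations password index → out = get_variations_alt password index
instance (password : String) (index : Int) (out : List String) : Decidable (Spec_get_variations password index out) := by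
  unfold Spec_get_variations; infer_instance

def pvDiffWitness_get_variations : String × Int := ("b", -1)
def pvDiffWitnessOut_get_variations : (List String) × (List String) :=
  (["Cb", "8b", "6b", "C", "8", "6"], [])

-- ===== CLAIM (what is proved, stated in full; the proofs are below) =====
def Claim_unchanged_get_variations : Prop := ∀ (password : String) (index : Int), Dom_get_variations password index → Spec_get_variations password index (get_variations password index)
def Claim_changed_get_variations : Prop := Dom_get_variations (pvDiffWitness_get_variations.1) (pvDiffWitness_get_variations.2) ∧ D_get_variations (pvDiffWitness_get_variations.1) (pvDiffWitness_get_variations.2) ∧ get_variations (pvDiffWitness_get_variations.1) (pvDiffWitness_get_variations.2) = pvDiffWitnessOut_get_variations.1 ∧ get_variations_alt (pvDiffWitness_get_variations.1) (pvDiffWitness_get_variations.2) = pvDiffWitnessOut_get_variations.2 ∧ pvDiffWitnessOut_get_variations.1 ≠ pvDiffWitnessOut_get_variations.2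
def Claim_exact_get_variations : Prop := ∀ (password : String) (index : Int), Dom_get_variations password index → D_get_variations password index → get_variations password index ≠ get_variations_alt password index

-- ===== LEMMAS AND PROOFS =====
-- the two tables agree: B's first-match string lookup is A's list-of-chars dict entry
set_option maxRecDepth 8192 in
lemma leet_eq_charAlts (c : Char) : (leet.get? c).map String.toList = charAlts c := by
  unfold charAlts
  split <;> first
    | decide
    | (simp_all [leet, PySem.Dict.get?, BEq.beq]; omega) | (simp_all [leet, PySem.Dict.get?, BEq.beq, eq_comm])

-- proof-only layer: A's recursion re-stated as a well-founded definition (varsA/varsALoop),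
-- proved equal to the fueled port once the fuel exceeds its bound, then related to expand

lemma length_pySubst (s : List Char) (i : Int) (a : Char)
    (h1 : -(s.length : Int) ≤ i) (h2 : i < (s.length : Int)) :
    (pySubst s i a).length = if i = -1 then 2 * s.length else s.length := by
  unfold pySubst
  rcases lt_trichotomy i (-1) with hlt | heq | hgt
  · -- i ≤ -2
    have hk : i = -(((-i).toNat : Nat) : Int) := by omega
    have hk1 : i + 1 = -((((-i).toNat - 1 : Nat)) : Int) := by omega
    rw [hk, PySem.List.slice_to_neg_natCast s _ (by omega), ← hk,
        hk1, PySem.List.slice_from_neg_natCast s _ (by omega)]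
    simp only [List.length_append, List.length_take, List.length_drop, List.length_cons,
      List.length_nil]
    have : ¬ (i = -1) := by omega
    rw [if_neg this]
    omega
  · subst heq
    rw [PySem.List.slice_to_neg_one]
    norm_num [PySem.List.slice_zero_start, PySem.List.slice_none_none]
    omega
  · -- 0 ≤ i
    have h0 : 0 ≤ i := by omega
    rw [PySem.List.slice_to s h0, PySem.List.slice_from s (by omega)]
    simp only [List.length_append, List.length_take, List.length_drop, List.length_cons,
      List.length_nil]
    rw [if_neg (by omega)]
    omega

lemma varMeasure_subst_lt (s : List Char) (i : Int) (a : Char)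
    (h1 : -(s.length : Int) ≤ i) (h2 : i < (s.length : Int)) :
    varMeasure (pySubst s i a) (i + 1) < varMeasure s i := by
  have hl := length_pySubst s i a h1 h2
  unfold varMeasure
  split_ifs at hl ⊢ <;> omega

lemma varMeasure_succ_lt (s : List Char) (i : Int) (h2 : i < (s.length : Int)) :
    varMeasure s (i + 1) < varMeasure s i := by
  unfold varMeasure
  split_ifs <;> omega

lemma inRange_of_bind_some (s : List Char) (i : Int) (alts : List Char)
    (hm : (PySem.List.pyGet? s i).bind charAlts = some alts) :
    PySem.Raise.InRange s.length i := by
  rcases hg : PySem.List.pyGet? s i with _ | c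
  · rw [hg] at hm; simp at hm
  · have hne : ¬ PySem.List.pyGet? s i = none := by rw [hg]; simp
    have := (not_iff_not.mpr (PySem.List.pyGet?_eq_none_iff s i)).mp hne
    rwa [not_not] at this

-- the three decrease facts for A's recursion, as named lemmas (cited in decreasing_by)
lemma varsA_dec₁ (s : List Char) (i : Int) (alts : List Char) :
    Prod.Lex (· < ·) (Prod.Lex (· < ·) (· < ·)) (varMeasure s i, 0, alts.length) (varMeasure s i, 1, 0) :=
  Prod.Lex.right _ (Prod.Lex.left _ _ (by omega))

lemma varsA_dec₂ (s : List Char) (i : Int) (hi : i < (s.length : Int)) :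
    Prod.Lex (· < ·) (Prod.Lex (· < ·) (· < ·)) (varMeasure s (i + 1), 1, 0) (varMeasure s i, 1, 0) :=
  Prod.Lex.left _ _ (varMeasure_succ_lt s i hi)

lemma varsA_dec₃ (s : List Char) (i : Int) (a : Char) (rest : List Char)
    (h : PySem.Raise.InRange s.length i) :
    Prod.Lex (· < ·) (Prod.Lex (· < ·) (· < ·)) (varMeasure (pySubst s i a) (i + 1), 1, 0)
      (varMeasure s i, 0, (a :: rest).length) :=
  Prod.Lex.left _ _ (varMeasure_subst_lt s i a h.1 h.2)

lemma varsA_dec₄ (s : List Char) (i : Int) (a : Char) (rest : List Char)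
    (h : PySem.Raise.InRange s.length i) :
    Prod.Lex (· < ·) (Prod.Lex (· < ·) (· < ·)) (varMeasure s i, 0, rest.length)
      (varMeasure s i, 0, (a :: rest).length) :=
  Prod.Lex.right _ (Prod.Lex.right _ (by simp))

mutual
-- A: recursive enumeration, halted (via the bare `except`) by IndexError/KeyError
def varsA (s : List Char) (i : Int) : List String :=
  if hi : i < (s.length : Int) then
    match hm : (PySem.List.pyGet? s i).bind charAlts with
    | none => []
    | some alts =>
      varsALoop s i alts (inRange_of_bind_some s i alts hm) ++ varsA s (i + 1)
  else []
  termination_by (varMeasure s i, 1, 0)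
  decreasing_by
  · exact varsA_dec₁ s i alts
  · exact varsA_dec₂ s i hi

-- A's `for char_alternative in …` loop body (append variation, extend with recursion)
def varsALoop (s : List Char) (i : Int) (alts : List Char)
    (h : PySem.Raise.InRange s.length i) : List String :=
  match alts with
  | [] => []
  | a :: rest =>
    String.ofList (pySubst s i a) :: (varsA (pySubst s i a) (i + 1) ++ varsALoop s i rest h)
  termination_by (varMeasure s i, 0, alts.length)
  decreasing_by
  · exact varsA_dec₃ s i a rest h
  · exact varsA_dec₄ s i a rest h
end

lemma charAlts_mem_lower (c : Char) (l : List Char) (h : charAlts c = some l) :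
    'a' ≤ c ∧ c ≤ 'z' := by
  unfold charAlts at h
  split at h <;> first | (injection h; done) | (subst_vars; decide)

set_option maxRecDepth 4096 in
lemma lower_charAlts (c : Char) (h1 : 'a' ≤ c) (h2 : c ≤ 'z') :
    ∃ x t, charAlts c = some (x :: t) := by
  have ha : 97 ≤ c.toNat := Nat.succ_le_of_lt h1
  have hb : c.toNat ≤ 122 := Fin.mk_le_mk.mp h2
  rw [show c = Char.ofNat c.toNat from (Char.ofNat_toNat c).symm]
  set n := c.toNat with hn
  clear_value n
  interval_cases n <;> exact ⟨_, _, rfl⟩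

lemma varsA_stop (s : List Char) (i : Int) (h : ¬ i < (s.length : Int)) : varsA s i = [] := by
  rw [varsA]; simp [h]

lemma varsA_none (s : List Char) (i : Int) (h : (PySem.List.pyGet? s i).bind charAlts = none) :
    varsA s i = [] := by
  rw [varsA]; split
  · split <;> simp_all
  · rfl

lemma varsA_some (s : List Char) (i : Int) (alts : List Char) (hi : i < (s.length : Int))
    (h : (PySem.List.pyGet? s i).bind charAlts = some alts) (hpf : PySem.Raise.InRange s.length i) :
    varsA s i = varsALoop s i alts hpf ++ varsA s (i + 1) := by
  rw [varsA]
  rw [dif_pos hi]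
  split <;> simp_all

lemma varsALoop_nil (s : List Char) (i : Int) (h : PySem.Raise.InRange s.length i) :
    varsALoop s i [] h = [] := by rw [varsALoop]

lemma varsALoop_cons (s : List Char) (i : Int) (a : Char) (rest : List Char)
    (h : PySem.Raise.InRange s.length i) :
    varsALoop s i (a :: rest) h
      = String.ofList (pySubst s i a) :: (varsA (pySubst s i a) (i + 1) ++ varsALoop s i rest h) := by
  rw [varsALoop]

-- the fueled ports compute the well-founded versions whenever the fuel exceeds the bound
lemma varsAF_eq (n : Nat) : ∀ (s : List Char) (i : Int) (f : Nat),
    varMeasure s i ≤ n → varMeasure s i < f → varsAF f s i = varsA s i := by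
  induction n with
  | zero =>
    intro s i f h hf
    have hstop : ¬ i < (s.length : Int) := by
      unfold varMeasure at h; split_ifs at h <;> omega
    obtain ⟨f', rfl⟩ : ∃ f', f = f' + 1 := ⟨f - 1, by omega⟩
    rw [varsA_stop s i hstop]
    simp [varsAF, hstop]
  | succ n ih =>
    intro s i f h hf
    obtain ⟨f', rfl⟩ : ∃ f', f = f' + 1 := ⟨f - 1, by omega⟩
    by_cases hi : i < (s.length : Int)
    · cases hbind : (PySem.List.pyGet? s i).bind charAlts with
      | none => rw [varsA_none s i hbind]; simp [varsAF, hi, hbind]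
      | some alts =>
        have hpf := inRange_of_bind_some s i alts hbind
        have hlt := varMeasure_succ_lt s i hi
        have hmain : varsAF (f' + 1) s i
            = (alts.foldl (fun acc a =>
                acc ++ [String.ofList (pySubst s i a)] ++ varsAF f' (pySubst s i a) (i + 1)) [])
              ++ varsAF f' s (i + 1) := by
          simp [varsAF, hi, hbind]
        have hfold : ∀ (alts' : List Char) (acc : List String),
            alts'.foldl (fun acc a =>
                acc ++ [String.ofList (pySubst s i a)] ++ varsAF f' (pySubst s i a) (i + 1)) acc
              = acc ++ varsALoop s i alts' hpf := by
          intro alts'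
          induction alts' with
          | nil => intro acc; simp [varsALoop_nil]
          | cons a rest ihl =>
            intro acc
            rw [List.foldl_cons, ihl, varsALoop_cons,
              ih (pySubst s i a) (i + 1) f'
                (by have := varMeasure_subst_lt s i a hpf.1 hpf.2; omega)
                (by have := varMeasure_subst_lt s i a hpf.1 hpf.2; omega)]
            simp
        rw [hmain, varsA_some s i alts hi hbind hpf,
          ih s (i + 1) f' (by omega) (by omega), hfold alts []]
        simp
    · rw [varsA_stop s i hi]
      simp [varsAF, hi]

lemma gv_eq (password : String) (index : Int) :
    get_variations password index = varsA password.toList index :=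
  varsAF_eq (varMeasure password.toList index) _ _ _ le_rfl (Nat.lt_succ_self _)

-- decomposition facts for an in-range substitution position
lemma take_succ_of_drop (s : List Char) (n : Nat) (c : Char) (rest : List Char)
    (hdrop : s.drop n = c :: rest) : s.take (n + 1) = s.take n ++ [c] := by
  have hn : n < s.length := by
    by_contra hc
    rw [List.drop_eq_nil_of_le (by omega)] at hdrop
    simp at hdrop
  have hget : s[n]? = some c := by
    have h0 : (s.drop n)[0]? = s[n]? := by
      rw [List.getElem?_drop]
      simp
    rw [← h0, hdrop]
    rfl
  rw [List.take_add_one, hget]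
  rfl

lemma drop_succ_of_drop (s : List Char) (n : Nat) (c : Char) (rest : List Char)
    (hdrop : s.drop n = c :: rest) : s.drop (n + 1) = rest := by
  rw [← List.tail_drop, hdrop]
  rfl

lemma pySubst_decomp (s : List Char) (i : Int) (h0 : 0 ≤ i) (a c : Char) (rest : List Char)
    (hdrop : s.drop i.toNat = c :: rest) :
    pySubst s i a = s.take i.toNat ++ a :: rest := by
  unfold pySubst
  rw [PySem.List.slice_to s h0, PySem.List.slice_from s (by omega),
    show (i + 1).toNat = i.toNat + 1 from by omega,
    drop_succ_of_drop s i.toNat c rest hdrop]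
  simp

-- proof-only description of what a stack task contributes: expand p t = all variations of
-- tail t behind prefix p, in B's pop order (= A's pre-order)
mutual
def expand : List Char → List Char → List String
  | _, [] => []
  | p, c :: tl =>
    match charAlts c with
    | none => []
    | some alts => expandA p tl alts ++ expand (p ++ [c]) tl
  termination_by p t => (t.length, 1, 0)
  decreasing_by
  · simp only [List.length_cons]
    exact Prod.Lex.right _ (Prod.Lex.left _ _ (by omega))
  · simp only [List.length_cons]
    exact Prod.Lex.left _ _ (by omega)

def expandA : List Char → List Char → List Char → List String
  | _, _, [] => []
  | p, tl, a :: rest =>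
    String.ofList (p ++ a :: tl) :: (expand (p ++ [a]) tl ++ expandA p tl rest)
  termination_by p tl alts => (tl.length + 1, 0, alts.length)
  decreasing_by
  · exact Prod.Lex.left _ _ (by omega)
  · simp only [List.length_cons]
    exact Prod.Lex.right _ (Prod.Lex.right _ (by omega))
end

def stackWeight : List Char × List Char × Bool → Nat
  | (_, t, _) => 12 ^ (t.length + 1)

def stackMeasure (st : List (List Char × List Char × Bool)) : Nat :=
  (st.map stackWeight).sum

def entryOut : List Char × List Char × Bool → List String
  | (p, t, em) => (if em then [String.ofList (p ++ t)] else []) ++ expand p t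

lemma expand_nil (p : List Char) : expand p [] = [] := by rw [expand]

lemma expand_cons (p : List Char) (c : Char) (tl : List Char) :
    expand p (c :: tl)
      = match charAlts c with
        | none => []
        | some alts => expandA p tl alts ++ expand (p ++ [c]) tl := by
  rw [expand]

lemma expandA_nil (p tl : List Char) : expandA p tl [] = [] := by rw [expandA]

lemma expandA_cons (p tl : List Char) (a : Char) (rest : List Char) :
    expandA p tl (a :: rest)
      = String.ofList (p ++ a :: tl) :: (expand (p ++ [a]) tl ++ expandA p tl rest) := by
  rw [expandA]

lemma charAlts_short (c : Char) (l : List Char) (h : charAlts c = some l) : l.length ≤ 5 := by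
  unfold charAlts at h
  split at h <;> first | (injection h with h; subst h; decide) | (cases h)

lemma stackMeasure_append (l1 l2 : List (List Char × List Char × Bool)) :
    stackMeasure (l1 ++ l2) = stackMeasure l1 + stackMeasure l2 := by
  simp [stackMeasure]

lemma stackMeasure_pushed (subs : List Char) (p tl : List Char) :
    stackMeasure (subs.map fun a => (p ++ [a], tl, true)) = subs.length * 12 ^ (tl.length + 1) := by
  induction subs with
  | nil => simp [stackMeasure]
  | cons a rest ih =>
    simp only [List.map_cons, stackMeasure, List.sum_cons] at ih ⊢
    rw [ih]
    simp [stackWeight]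
    ring

lemma pushed_out (subs : List Char) (p tl : List Char) :
    ((subs.map fun a => (p ++ [a], tl, true))).flatMap entryOut = expandA p tl subs := by
  induction subs with
  | nil => simp [expandA_nil]
  | cons a rest ih =>
    simp only [List.map_cons, List.flatMap_cons, ih, expandA_cons]
    simp [entryOut]

-- every pop strictly decreases the stack measure, so this fuel bound makes the loop run to
-- completion and compute exactly the concatenated contributions of the stacked items
lemma varLoopF_spec (f : Nat) : ∀ (st : List (List Char × List Char × Bool))
    (out : List String), stackMeasure st < f → varLoopF f out st = out ++ st.flatMap entryOut := by
  induction f with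
  | zero => intro st out h; omega
  | succ f ih =>
    intro st out h
    match st with
    | [] => simp [varLoopF]
    | (p, t, em) :: rest =>
      have hout : ∀ t', (if em then out ++ [String.ofList (p ++ t')] else out)
          = out ++ (if em then [String.ofList (p ++ t')] else []) := by
        intro t'; cases em <;> simp
      match t with
      | [] =>
        rw [show varLoopF (f + 1) out ((p, [], em) :: rest)
              = varLoopF f (if em then out ++ [String.ofList (p ++ [])] else out) rest from rfl,
          ih rest _ (by simp [stackMeasure, stackWeight, pow_succ] at h ⊢; omega), hout]
        simp [entryOut, expand_nil]
      | c :: tl =>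
        have hw' : 0 < 12 ^ tl.length := pow_pos (by norm_num) _
        cases hg : leet.get? c with
        | none =>
          have hca : charAlts c = none := by
            have := leet_eq_charAlts c; rw [hg] at this; simpa using this.symm
          rw [show varLoopF (f + 1) out ((p, c :: tl, em) :: rest)
                = varLoopF f (if em then out ++ [String.ofList (p ++ c :: tl)] else out) rest from by
              simp [varLoopF, hg],
            ih rest _ (by
              simp only [stackMeasure, stackWeight, List.map_cons, List.sum_cons,
                List.length_cons] at h ⊢
              rw [pow_succ, pow_succ] at h
              nlinarith), hout]
          simp [entryOut, expand_cons, hca]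
        | some subs =>
          have hca : charAlts c = some subs.toList := by
            have := leet_eq_charAlts c; rw [hg] at this; simpa using this.symm
          have hk : subs.toList.length ≤ 5 := charAlts_short c _ hca
          have hstep : varLoopF (f + 1) out ((p, c :: tl, em) :: rest)
              = varLoopF f (if em then out ++ [String.ofList (p ++ c :: tl)] else out)
                  ((subs.toList.map fun a => (p ++ [a], tl, true)) ++ (p ++ [c], tl, false) :: rest) := by
            simp [varLoopF, hg]
          have hm : stackMeasure
              ((subs.toList.map fun a => (p ++ [a], tl, true)) ++ (p ++ [c], tl, false) :: rest) < f := by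
            rw [stackMeasure_append, stackMeasure_pushed]
            simp only [stackMeasure, stackWeight, List.map_cons, List.sum_cons,
              List.length_cons, pow_succ] at h ⊢
            nlinarith [Nat.mul_le_mul_right (12 ^ tl.length * 12) hk, hw']
          rw [hstep, ih _ _ hm, hout]
          simp only [List.flatMap_append, List.flatMap_cons, pushed_out, List.append_assoc]
          simp [entryOut, expand_cons, hca]

-- the well-founded A equals B's expansion at every nonnegative position
lemma varsA_eq_expand (n : Nat) : ∀ (s : List Char) (i : Int), ((s.length : Int) - i).toNat ≤ n → 0 ≤ i →
    varsA s i = expand (s.take i.toNat) (s.drop i.toNat) := by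
  induction n with
  | zero =>
    intro s i h h0
    rw [varsA_stop s i (by omega), List.drop_eq_nil_of_le (by omega), expand_nil]
  | succ n ih =>
    intro s i h h0
    by_cases hi : i < (s.length : Int)
    · have hlt : i.toNat < s.length := by omega
      have hdrop : s.drop i.toNat = s[i.toNat] :: s.drop (i.toNat + 1) := List.drop_eq_getElem_cons hlt
      have hget : PySem.List.pyGet? s i = some s[i.toNat] := by
        rw [PySem.List.pyGet?_of_nonneg s h0, List.getElem?_eq_getElem hlt]
      have hi1 : (i + 1).toNat = i.toNat + 1 := by omega
      have htake1 : s.take (i.toNat + 1) = s.take i.toNat ++ [s[i.toNat]] :=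
        take_succ_of_drop s i.toNat _ _ hdrop
      cases hca : charAlts s[i.toNat] with
      | none =>
        rw [varsA_none s i (by rw [hget]; simpa using hca), hdrop, expand_cons, hca]
      | some alts =>
        have hpf : PySem.Raise.InRange s.length i := ⟨by omega, hi⟩
        rw [varsA_some s i alts hi (by rw [hget]; simpa using hca) hpf]
        have hrec : varsA s (i + 1) = expand (s.take i.toNat ++ [s[i.toNat]]) (s.drop (i.toNat + 1)) := by
          rw [ih s (i + 1) (by omega) (by omega), hi1, htake1]
        have hloop : ∀ alts' : List Char,
            varsALoop s i alts' hpf = expandA (s.take i.toNat) (s.drop (i.toNat + 1)) alts' := by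
          intro alts'
          induction alts' with
          | nil => rw [varsALoop_nil, expandA_nil]
          | cons a rest' ihl =>
            rw [varsALoop_cons, ihl, expandA_cons]
            have hv : pySubst s i a = s.take i.toNat ++ a :: s.drop (i.toNat + 1) :=
              pySubst_decomp s i h0 a _ _ hdrop
            have hvlen : (pySubst s i a).length = s.length := by
              rw [length_pySubst s i a hpf.1 hpf.2, if_neg (by omega)]
            have htl : (s.take i.toNat).length = i.toNat := by
              simp [List.length_take]
              omega
            have hvrec : varsA (pySubst s i a) (i + 1)
                = expand (s.take i.toNat ++ [a]) (s.drop (i.toNat + 1)) := by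
              rw [ih (pySubst s i a) (i + 1) (by rw [hvlen]; omega) (by omega), hi1, hv]
              have ht : (s.take i.toNat ++ a :: s.drop (i.toNat + 1)).take (i.toNat + 1)
                  = s.take i.toNat ++ [a] := by
                rw [List.take_append, htl]
                simp
              have hd : (s.take i.toNat ++ a :: s.drop (i.toNat + 1)).drop (i.toNat + 1)
                  = s.drop (i.toNat + 1) := by
                rw [List.drop_append, htl]
                simp
              rw [ht, hd]
            rw [hvrec, hv]
        rw [hloop alts, hrec, hdrop, expand_cons, hca]
    · rw [varsA_stop s i hi, List.drop_eq_nil_of_le (by omega), expand_nil]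

-- ===== VERDICT (by name: the statement is the Claim_ definition above) =====
theorem get_variations_spec : Claim_unchanged_get_variations := by
  intro password index _
  unfold Spec_get_variations
  intro hD
  rw [gv_eq]
  unfold get_variations_alt
  by_cases h0 : 0 ≤ index
  · rw [if_neg (by omega), PySem.List.slice_to _ h0, PySem.List.slice_from _ h0,
      varLoopF_spec _ _ [] (by simp [stackMeasure, stackWeight])]
    simp only [List.flatMap_cons, List.flatMap_nil, List.nil_append, List.append_nil, entryOut]
    exact varsA_eq_expand (((password.toList.length : Int)) - index).toNat
      password.toList index le_rfl h0
  · rw [if_pos (by omega)]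
    cases hg : PySem.List.pyGet? password.toList index with
    | none => exact varsA_none _ _ (by rw [hg]; rfl)
    | some c =>
      cases hca : charAlts c with
      | none => exact varsA_none _ _ (by rw [hg]; simpa using hca)
      | some l =>
        exfalso
        apply hD
        unfold D_get_variations
        refine ⟨by omega, ?_⟩
        have hgs : PySem.Str.pyGet? password index = some c := by
          simpa [PySem.Str.pyGet?] using hg
        rw [hgs]
        simpa using charAlts_mem_lower c l hca

theorem get_variations_changed : Claim_changed_get_variations := by
  unfold Claim_changed_get_variations
  decide

theorem get_variations_tight : Claim_exact_get_variations := by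
  intro password index _ hD
  obtain ⟨hneg, helim⟩ := hD
  cases hg : PySem.Str.pyGet? password index with
  | none => rw [hg] at helim; simp at helim
  | some c =>
    rw [hg] at helim
    simp only [Option.elim, decide_eq_true_eq] at helim
    obtain ⟨x, t, hca⟩ := lower_charAlts c helim.1 helim.2
    have hgl : PySem.List.pyGet? password.toList index = some c := by
      simpa [PySem.Str.pyGet?] using hg
    have hin : PySem.Raise.InRange password.toList.length index := by
      by_contra hni
      rw [← PySem.List.pyGet?_eq_none_iff] at hni
      rw [hgl] at hni
      simp at hni
    rw [gv_eq]
    unfold get_variations_alt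
    rw [if_pos (by omega)]
    rw [varsA_some password.toList index (x :: t) hin.2 (by rw [hgl]; simpa using hca) hin,
      varsALoop_cons]
    simp
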